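-- pv_equiv track=rewrite | github.com/CornellNLP/CS4300_Flask_template | app/data/formatting.py | generate_speakers_dict
-- ===== SOURCE A (Python) =====
-- def generate_speakers_dict(debate):
--     speakers = set(debate['candidates'] + debate['other_speakers'])
--     speakers_dict = dict()
--     for name in speakers:
--         for name_part in name.lower().split(' '):
--             if name_part in speakers_dict:
--                 speakers_dict[name_part] = None
--             else:
--                 speakers_dict[name_part] = name
--
--     # remove names that can point to multiple people
--     return {k: v for k, v in speakers_dict.items() if v is not None}
-- ===== SOURCE B (Python) =====
-- def generate_speakers_dict(debate):
--     speakers = set(debate['candidates'] + debate['other_speakers'])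
--     pairs = [(part, name)
--              for name in speakers
--              for part in name.lower().split(' ')]
--     counts = {}
--     for part, _ in pairs:
--         counts[part] = counts.get(part, 0) + 1
--     return {part: name for part, name in pairs if counts[part] == 1}
-- ===== Notes on version B (the rewrite author's own statement) =====
-- stated objective: alternative
-- what changed: Replaces A's single pass with a sentinel-None overwrite dict by a two-pass decomposition: flatten speakers into (part, name) pairs, build a frequency table of the parts, then keep exactly the pairs whose part occurs once; Pre_ excludes inputs missing the 'candidates' or 'other_speakers' key, where A raises KeyError.
import Mathlib
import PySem

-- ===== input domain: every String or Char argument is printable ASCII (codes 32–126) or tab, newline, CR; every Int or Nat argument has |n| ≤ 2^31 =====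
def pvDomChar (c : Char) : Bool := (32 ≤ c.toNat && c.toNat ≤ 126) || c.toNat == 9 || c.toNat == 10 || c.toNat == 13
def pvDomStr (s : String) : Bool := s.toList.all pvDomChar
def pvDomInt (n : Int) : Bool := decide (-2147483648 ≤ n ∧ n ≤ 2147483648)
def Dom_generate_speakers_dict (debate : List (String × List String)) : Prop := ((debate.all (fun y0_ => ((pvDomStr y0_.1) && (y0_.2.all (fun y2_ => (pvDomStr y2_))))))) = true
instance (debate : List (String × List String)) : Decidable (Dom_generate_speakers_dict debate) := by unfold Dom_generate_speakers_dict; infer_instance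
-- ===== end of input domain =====

-- B replaces A's sentinel-None overwrite pass by a flatten / count / filter decomposition (same cost, 'alternative');
-- Pre_ excludes inputs where A raises KeyError (missing 'candidates'/'other_speakers' key).

-- ===== PORT A =====
-- shared helpers: debate[k] (first-match association-list lookup) and name.lower().split(' ')
def pvGetKey? (debate : List (String × List String)) (k : String) : Option (List String) :=
  (debate.find? (fun p => p.1 == k)).map Prod.snd

def pvParts (name : String) : List String :=
  (PySem.Str.split? (PySem.Str.lower name) " ").getD []  -- sep is the nonempty literal " ", so split? is `some`

def generate_speakers_dict (debate : List (String × List String)) : List (String × String) :=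
  match pvGetKey? debate "candidates", pvGetKey? debate "other_speakers" with
  | some c, some o =>
    let speakers : PySem.Set String := PySem.Set.ofList (c ++ o)
    let d : PySem.Dict String (Option String) :=
      speakers.foldl (fun d name =>
        (pvParts name).foldl (fun d part =>
          if d.contains part then d.insert part none else d.insert part (some name)) d)
        PySem.Dict.empty
    d.items.filterMap (fun p => p.2.map (fun v => (p.1, v)))
  | _, _ => []

-- ===== PORT B =====
def generate_speakers_dict_alt (debate : List (String × List String)) : List (String × String) :=
  match pvGetKey? debate "candidates" with
  | none => []
  | some c =>
  match pvGetKey? debate "other_speakers" with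
  | none => []
  | some o =>
    let speakers : PySem.Set String := PySem.Set.ofList (c ++ o)
    let pairs : List (String × String) :=
      speakers.flatMap (fun name => (pvParts name).map (fun part => (part, name)))
    let counts : PySem.Dict String Int :=
      (pairs.map Prod.fst).foldl (fun d x => d.insert x (d.getD x 0 + 1)) PySem.Dict.empty
    (pairs.foldl (fun d p => if counts.getD p.1 0 == 1 then d.insert p.1 p.2 else d)
      PySem.Dict.empty).items

-- ===== PRECONDITION & SPEC =====
-- Pre_ excludes exactly the inputs where Python A raises KeyError: debate must carry both keys.
def Pre_generate_speakers_dict (debate : List (String × List String)) : Prop :=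
  "candidates" ∈ debate.map Prod.fst ∧ "other_speakers" ∈ debate.map Prod.fst
instance (debate : List (String × List String)) : Decidable (Pre_generate_speakers_dict debate) := by unfold Pre_generate_speakers_dict; infer_instance

def pvWitness_generate_speakers_dict : (List (String × List String)) :=
  [("candidates", ["Al Gore", "George Bush"]), ("other_speakers", ["Jim Lehrer"])]

def Spec_generate_speakers_dict (debate : List (String × List String)) (out : List (String × String)) : Prop := out = generate_speakers_dict_alt debate
instance (debate : List (String × List String)) (out : List (String × String)) : Decidable (Spec_generate_speakers_dict debate out) := by unfold Spec_generate_speakers_dict; infer_instance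

-- ===== CLAIM (what is proved, stated in full; the proofs are below) =====
def Claim_equal_generate_speakers_dict : Prop := ∀ (debate : List (String × List String)), Dom_generate_speakers_dict debate → Pre_generate_speakers_dict debate → Spec_generate_speakers_dict debate (generate_speakers_dict debate)

-- ===== LEMMAS AND PROOFS =====

-- the step of A's inner loop, as a single function of the flattened (part, name) pair
def pvStepA (d : PySem.Dict String (Option String)) (p : String × String) : PySem.Dict String (Option String) :=
  if d.contains p.1 then d.insert p.1 none else d.insert p.1 (some p.2)

def pvF (p : String × Option String) : Option (String × String) := p.2.map (fun v => (p.1, v))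


lemma pv_foldl_if_filter {α β : Type} (l : List α) (d : β) (c : α → Bool) (g : β → α → β) :
    l.foldl (fun d p => if c p then g d p else d) d = (l.filter c).foldl g d := by
  induction l generalizing d with
  | nil => rfl
  | cons x xs ih => by_cases h : c x <;> simp [h, ih]

lemma pv_nested_foldl (names : List String) (d : PySem.Dict String (Option String)) :
    names.foldl (fun d name =>
      (pvParts name).foldl (fun d part =>
        if d.contains part then d.insert part none else d.insert part (some name)) d) d
    = (names.flatMap (fun name => (pvParts name).map (fun part => (part, name)))).foldl pvStepA d := by
  induction names generalizing d with
  | nil => rfl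
  | cons n ns ih => simp [List.foldl_append, ih, List.foldl_map, pvStepA]

lemma pv_getKey_some {debate : List (String × List String)} {k : String}
    (h : k ∈ debate.map Prod.fst) : ∃ v, pvGetKey? debate k = some v := by
  unfold pvGetKey?
  obtain ⟨p, hp, hk⟩ := List.mem_map.mp h
  subst hk
  have : (debate.find? (fun q => q.1 == p.1)).isSome := by
    rw [List.find?_isSome]; exact ⟨p, hp, by simp⟩
  obtain ⟨q, hq⟩ := Option.isSome_iff_exists.mp this
  exact ⟨q.2, by rw [hq]; rfl⟩

lemma pvStepA_eq_insert : pvStepA = fun d p => d.insert p.1 (if d.contains p.1 then none else some p.2) := by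
  funext d p; unfold pvStepA; split <;> simp_all

lemma pv_keys_stepA (l : List (String × String)) :
    (l.foldl pvStepA PySem.Dict.empty).keys = PySem.Set.ofList (l.map Prod.fst) := by
  rw [pvStepA_eq_insert, PySem.Dict.keys_foldl_insert_key]
  simp [PySem.Dict.keys_empty, PySem.Set.ofList_eq_foldl, PySem.Set.update]


lemma pv_filterMap_replace (items : List (String × Option String)) (k : String) :
    (items.map (fun p => if p.1 == k then (k, (none : Option String)) else p)).filterMap pvF
    = (items.filterMap pvF).filter (fun q => !(q.1 == k)) := by
  induction items with
  | nil => rfl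
  | cons p ps ih =>
    obtain ⟨a, v⟩ := p
    by_cases h : a = k <;> cases v <;> simp [pvF, h] <;> simpa [pvF] using ih

lemma pv_nodup_filtered (pairs : List (String × String)) :
    ((pairs.filter (fun p => (pairs.map Prod.fst).count p.1 == 1)).map Prod.fst).Nodup := by
  rw [List.nodup_iff_count_le_one]
  intro a
  by_cases ha : a ∈ (pairs.filter (fun p => (pairs.map Prod.fst).count p.1 == 1)).map Prod.fst
  · obtain ⟨p, hp, rfl⟩ := List.mem_map.mp ha
    have h1 : (pairs.map Prod.fst).count p.1 = 1 := by
      have := (List.mem_filter.mp hp).2; simpa using this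
    have hsub : ((pairs.filter (fun p => (pairs.map Prod.fst).count p.1 == 1)).map Prod.fst).Sublist (pairs.map Prod.fst) :=
      List.filter_sublist.map Prod.fst
    calc _ ≤ (pairs.map Prod.fst).count p.1 := hsub.count_le _
      _ = 1 := h1
  · simp [List.count_eq_zero_of_not_mem ha]

lemma pv_counts_getD (ks : List String) (k : String) :
    (ks.foldl (fun d x => d.insert x (d.getD x 0 + 1)) (PySem.Dict.empty : PySem.Dict String Int)).getD k 0 = (ks.count k : Int) := by
  rw [PySem.Dict.getD_foldl_insert_add_one]
  simp [PySem.Dict.getD_empty]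

lemma pv_B_char (pairs : List (String × String)) :
    (pairs.foldl (fun d p =>
        if ((pairs.map Prod.fst).foldl (fun d x => d.insert x (d.getD x 0 + 1)) (PySem.Dict.empty : PySem.Dict String Int)).getD p.1 0 == 1
        then d.insert p.1 p.2 else d) PySem.Dict.empty).items
    = pairs.filter (fun p => (pairs.map Prod.fst).count p.1 == 1) := by
  have hc : ∀ p : String × String,
      (((pairs.map Prod.fst).foldl (fun d x => d.insert x (d.getD x 0 + 1)) (PySem.Dict.empty : PySem.Dict String Int)).getD p.1 0 == 1)
      = ((pairs.map Prod.fst).count p.1 == 1) := by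
    intro p
    rw [pv_counts_getD]
    by_cases h : (pairs.map Prod.fst).count p.1 = 1 <;> simp [h]
  calc (pairs.foldl (fun d p =>
        if ((pairs.map Prod.fst).foldl (fun d x => d.insert x (d.getD x 0 + 1)) (PySem.Dict.empty : PySem.Dict String Int)).getD p.1 0 == 1
        then d.insert p.1 p.2 else d) PySem.Dict.empty).items
      = (pairs.foldl (fun d p =>
        if (pairs.map Prod.fst).count p.1 == 1
        then d.insert p.1 p.2 else d) PySem.Dict.empty).items := by
        congr 1; apply PySem.List.foldl_congr_mem; intro d p _; rw [hc]
    _ = ((pairs.filter (fun p => (pairs.map Prod.fst).count p.1 == 1)).foldl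
          (fun d p => d.insert p.1 p.2) PySem.Dict.empty).items := by
        rw [pv_foldl_if_filter]
    _ = pairs.filter (fun p => (pairs.map Prod.fst).count p.1 == 1) := by
        rw [PySem.Dict.items_foldl_insert_fresh]
        · simp [PySem.Dict.empty]
        · intro a _; exact PySem.Dict.contains_empty _
        · exact pv_nodup_filtered pairs

lemma pv_contains_stepA (l : List (String × String)) (k : String) :
    (l.foldl pvStepA PySem.Dict.empty).contains k = decide (k ∈ l.map Prod.fst) := by
  have h := pv_keys_stepA l
  rw [show ((l.foldl pvStepA PySem.Dict.empty).contains k)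
      = decide (k ∈ (l.foldl pvStepA PySem.Dict.empty).keys) from by
    by_cases hm : (l.foldl pvStepA PySem.Dict.empty).contains k = true
    · simp [hm, (PySem.Dict.contains_iff_mem_keys _ _).mp hm]
    · simp only [Bool.not_eq_true] at hm
      simp [hm]
      exact fun hx => by simp [(PySem.Dict.contains_iff_mem_keys _ _).mpr hx] at hm]
  rw [h]
  simp [PySem.Set.mem_ofList]

lemma pvStepA_of_contains (d : PySem.Dict String (Option String)) (p : String × String)
    (h : d.contains p.1 = true) : pvStepA d p = d.insert p.1 none := by
  unfold pvStepA; rw [if_pos h]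

lemma pvStepA_of_not_contains (d : PySem.Dict String (Option String)) (p : String × String)
    (h : d.contains p.1 = false) : pvStepA d p = d.insert p.1 (some p.2) := by
  unfold pvStepA; rw [if_neg (by simp [h])]

lemma pv_A_char (l : List (String × String)) :
    (l.foldl pvStepA PySem.Dict.empty).items.filterMap pvF
    = l.filter (fun p => (l.map Prod.fst).count p.1 == 1) := by
  induction l using List.reverseRecOn with
  | nil => rfl
  | append_singleton l x ih =>
    rw [List.foldl_append]
    by_cases hc : x.1 ∈ l.map Prod.fst
    · -- overwrite with none
      have hcontains : (l.foldl pvStepA PySem.Dict.empty).contains x.1 = true := by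
        rw [pv_contains_stepA]; simpa using hc
      have hcount : 1 ≤ (l.map Prod.fst).count x.1 := List.count_pos_iff.mpr hc
      rw [show List.foldl pvStepA (l.foldl pvStepA PySem.Dict.empty) [x] = pvStepA (l.foldl pvStepA PySem.Dict.empty) x from rfl]
      rw [pvStepA_of_contains _ _ hcontains]
      rw [PySem.Dict.items_insert_of_contains _ _ hcontains,
          pv_filterMap_replace, ih, List.filter_filter, List.filter_append]
      have h2 : List.filter (fun p => ((l ++ [x]).map Prod.fst).count p.1 == 1) [x] = [] := by
        simp [List.count_append]; omega
      rw [h2, List.append_nil]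
      apply List.filter_congr
      intro p hp
      by_cases he : p.1 = x.1
      · have h1 : 1 ≤ (l.map Prod.fst).count p.1 := by rw [he]; exact hcount
        simp [List.count_append, he]; omega
      · simp [List.count_append, Ne.symm he, he]
    · have hcontains : (l.foldl pvStepA PySem.Dict.empty).contains x.1 = false := by
        rw [pv_contains_stepA]; simpa using hc
      have hcount0 : (l.map Prod.fst).count x.1 = 0 := List.count_eq_zero_of_not_mem hc
      rw [show List.foldl pvStepA (l.foldl pvStepA PySem.Dict.empty) [x] = pvStepA (l.foldl pvStepA PySem.Dict.empty) x from rfl]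
      rw [pvStepA_of_not_contains _ _ hcontains]
      rw [PySem.Dict.items_insert_of_not_contains _ _ hcontains,
          List.filterMap_append, ih, List.filter_append]
      have h2 : List.filter (fun p => ((l ++ [x]).map Prod.fst).count p.1 == 1) [x] = [x] := by
        simp [List.count_append, hcount0]
      rw [h2, show List.filterMap pvF [(x.1, some x.2)] = [x] from by simp [pvF]]
      congr 1
      apply List.filter_congr
      intro p hp
      have hne : p.1 ≠ x.1 := by
        intro he
        exact absurd (List.mem_map.mpr ⟨p, hp, he⟩) hc
      simp [List.count_append, Ne.symm hne]


-- ===== VERDICT (by name: the statement is the Claim_ definition above) =====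
theorem generate_speakers_dict_spec : Claim_equal_generate_speakers_dict := by
  intro debate _ pre
  obtain ⟨c, hc⟩ := pv_getKey_some pre.1
  obtain ⟨o, ho⟩ := pv_getKey_some pre.2
  unfold Spec_generate_speakers_dict generate_speakers_dict generate_speakers_dict_alt
  rw [hc, ho]
  dsimp only
  rw [pv_nested_foldl]
  rw [show (fun (p : String × Option String) => p.2.map (fun v => (p.1, v))) = pvF from rfl]
  rw [pv_A_char, pv_B_char]
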